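-- pv_equiv track=rewrite | github.com/dmsavvin/hrank | hrank/queens_on_board/queens_on_board.py | get_line_queens_arrangements
-- ===== SOURCE A (Python) =====
-- def get_line_queens_arrangements(row: int, intervals: tuple) -> tuple:
--     '''Generate all possible arrangements of the queens for a given line.
--
--     Line represents as row - line position in the board and the collection of
--     the intervals that are generated from the line.
--
--     Queen's position is stored as a tuple (i, j) where i and j are row and
--     column within the board. Queens arrangement is stored as a frozenset of the
--     queen's positions.
--
--     Example:
--       line: '...##..#'
--       args: row = x, intervals = ((0, 2), (5, 6))
--       result: ({}, {(x, 0)}, {(x, 1)}, {(x, 2)},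
--                {(x, 5)}, {(x, 0), (x, 5)}, {(x, 1), (x, 5)}, {(x, 2), (x, 5)},
--                {(x, 6)}, {(x, 0), (x, 6)}, {(x, 1), (x, 6)}, {(x, 2), (x, 6)},
--                )
--     '''
--     number_of_intervals = len(intervals)
--     intervals_begins = [i for i, _ in intervals]
--     intervals_lengths = [j - i + 1 for i, j in intervals]
--     queens_columns = [0 for _ in intervals]
--     queens_arrangements = []
--
--     # Each interval has no more than 1 queen. Queen's column (element of
--     # queens_columns) value can be 0, 1, 2, ..., len(interval). 0 is treated as
--     # an absence of the queen in the given interval.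
--     while queens_columns != intervals_lengths:
--         arrangement = frozenset((row, column + offset - 1)
--                                 for column, offset
--                                 in zip(queens_columns, intervals_begins)
--                                 if column > 0)
--         queens_arrangements.append(arrangement)
--         for i in range(number_of_intervals):
--             queens_columns[i] = ((queens_columns[i] + 1)
--                                  % (intervals_lengths[i] + 1))
--             if queens_columns[i] != 0:
--                 break
--     arrangement = frozenset((row, column + offset - 1)
--                             for column, offset
--                             in zip(queens_columns, intervals_begins)
--                             if column > 0)
--     queens_arrangements.append(arrangement)
--     return tuple(queens_arrangements)
-- ===== SOURCE B (Python) =====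
-- def get_line_queens_arrangements(row: int, intervals: tuple) -> tuple:
--     '''Cartesian-product construction: per-interval option lists (None = no queen),
--     combined recursively with interval 0 varying fastest; each combination becomes
--     a frozenset of the chosen positions.'''
--     def options(interval):
--         begin, end = interval
--         return [None] + [(row, c) for c in range(begin, end + 1)]
--
--     def combos(idx):
--         if idx == len(intervals):
--             return [[]]
--         opts = options(intervals[idx])
--         return [[o] + rest for rest in combos(idx + 1) for o in opts]
--
--     return tuple(frozenset(p for p in combo if p is not None)
--                  for combo in combos(0))
-- ===== Notes on version B (the rewrite author's own statement) =====
-- stated objective: alternative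
-- what changed: Replaced the in-place mixed-radix odometer (a while-loop mutating a digit counter with carry propagation) by a recursive cartesian-product construction: per-interval option lists (None or a position) combined recursively with interval 0 varying fastest, each combination then filtered into a frozenset.
import Mathlib
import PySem

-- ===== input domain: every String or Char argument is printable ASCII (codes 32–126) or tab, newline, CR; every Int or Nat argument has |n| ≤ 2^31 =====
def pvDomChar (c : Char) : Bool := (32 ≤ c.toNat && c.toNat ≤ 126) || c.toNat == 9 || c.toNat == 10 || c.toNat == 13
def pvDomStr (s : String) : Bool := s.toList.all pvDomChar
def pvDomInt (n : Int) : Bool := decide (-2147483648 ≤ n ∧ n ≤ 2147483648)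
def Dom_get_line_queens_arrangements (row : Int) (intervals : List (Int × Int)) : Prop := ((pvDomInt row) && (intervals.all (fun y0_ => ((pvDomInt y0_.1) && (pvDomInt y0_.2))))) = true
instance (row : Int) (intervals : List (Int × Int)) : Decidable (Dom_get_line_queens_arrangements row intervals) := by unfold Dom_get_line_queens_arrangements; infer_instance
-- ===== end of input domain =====

-- B replaces A's in-place mixed-radix odometer while-loop by a recursive cartesian-product
-- construction over per-interval option lists (objective: alternative, same cost).

-- ===== PORT A =====
-- frozenset((row, column + offset - 1) for column, offset in zip(cols, begins) if column > 0)
def pvRawA (row : Int) (cols begins : List Int) : List (Int × Int) :=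
  ((cols.zip begins).filter (fun p => decide (0 < p.1))).map (fun p => (row, p.1 + p.2 - 1))

def pvArrA (row : Int) (cols begins : List Int) : List (Int × Int) :=
  PySem.Set.ofList (pvRawA row cols begins)

-- for i in range(n): cols[i] = (cols[i] + 1) % (lens[i] + 1); if cols[i] != 0: break
def pvIncA : List Int → List Int → List Int
  | [], _ => []
  | c :: cs, [] => c :: cs
  | c :: cs, l :: ls =>
    let c' := PySem.Int.mod (c + 1) (l + 1)
    if c' = 0 then c' :: pvIncA cs ls else c' :: cs

-- while cols != lens: append arrangement; increment — then append the final arrangement.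
-- fuel (the exact number of iterations, supplied below) only makes the recursion total.
def pvLoopA (row : Int) (begins lens : List Int) : Nat → List Int → List (List (Int × Int))
  | 0, cols => [pvArrA row cols begins]
  | fuel + 1, cols =>
    if cols = lens then [pvArrA row cols begins]
    else pvArrA row cols begins :: pvLoopA row begins lens fuel (pvIncA cols lens)

def get_line_queens_arrangements (row : Int) (intervals : List (Int × Int)) : List (List (Int × Int)) :=
  let begins := intervals.map (fun p => p.1)
  let lens := intervals.map (fun p => p.2 - p.1 + 1)
  let fuel := (lens.map (fun l => (l + 1).toNat)).prod
  pvLoopA row begins lens fuel (intervals.map (fun _ => (0 : Int)))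

-- ===== PORT B =====
-- [None] + [(row, c) for c in range(begin, end + 1)]
def pvOptionsB (row b e : Int) : List (Option (Int × Int)) :=
  none :: (PySem.List.pyRange b (e + 1) 1).map (fun c => some (row, c))

-- combos(idx): [[o] + rest for rest in combos(idx + 1) for o in opts]
def pvCombosB (row : Int) : List (Int × Int) → List (List (Option (Int × Int)))
  | [] => [[]]
  | (b, e) :: rest =>
    (pvCombosB row rest).flatMap (fun t => (pvOptionsB row b e).map (fun o => o :: t))

def get_line_queens_arrangements_alt (row : Int) (intervals : List (Int × Int)) : List (List (Int × Int)) :=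
  (pvCombosB row intervals).map (fun combo => PySem.Set.ofList (combo.filterMap id))

-- ===== PRECONDITION & SPEC =====
-- Pre_ excludes only inputs on which A never returns: an interval with end ≤ begin - 2 gives a
-- non-positive odometer modulus, so A raises ZeroDivisionError or loops forever.
def Pre_get_line_queens_arrangements (row : Int) (intervals : List (Int × Int)) : Prop :=
  ∀ p ∈ intervals, p.1 - 1 ≤ p.2
instance (row : Int) (intervals : List (Int × Int)) : Decidable (Pre_get_line_queens_arrangements row intervals) := by unfold Pre_get_line_queens_arrangements; infer_instance

def pvWitness_get_line_queens_arrangements : Int × (List (Int × Int)) := (5, [(0, 1), (3, 3)])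

def Spec_get_line_queens_arrangements (row : Int) (intervals : List (Int × Int)) (out : List (List (Int × Int))) : Prop := out = get_line_queens_arrangements_alt row intervals
instance (row : Int) (intervals : List (Int × Int)) (out : List (List (Int × Int))) : Decidable (Spec_get_line_queens_arrangements row intervals out) := by unfold Spec_get_line_queens_arrangements; infer_instance

-- ===== CLAIM (what is proved, stated in full; the proofs are below) =====
def Claim_equal_get_line_queens_arrangements : Prop := ∀ (row : Int) (intervals : List (Int × Int)), Dom_get_line_queens_arrangements row intervals → Pre_get_line_queens_arrangements row intervals → Spec_get_line_queens_arrangements row intervals (get_line_queens_arrangements row intervals)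

-- ===== LEMMAS AND PROOFS =====

-- the sequence of odometer states from a given state up to (and including) lens
def pvStates : List Int → List Int → List (List Int)
  | [], _ => [[]]
  | l :: ls, c :: cs =>
    ((List.range ((l - c).toNat + 1)).map (fun (i : Nat) => (c + (i : Int)) :: cs)) ++
    ((pvStates ls cs).drop 1).flatMap
      (fun t => (List.range ((l + 1).toNat)).map (fun (i : Nat) => ((i : Int)) :: t))
  | _ :: _, [] => [[]]

-- remaining number of increments
def pvSteps : List Int → List Int → Nat
  | l :: ls, c :: cs => (l - c).toNat + (l + 1).toNat * pvSteps ls cs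
  | _, _ => 0

-- the option-combo corresponding to a digit state
def pvToCombo (row : Int) : List (Int × Int) → List Int → List (Option (Int × Int))
  | (b, _) :: rest, i :: t =>
    (if 0 < i then some (row, i + b - 1) else none) :: pvToCombo row rest t
  | _, _ => []

def pvValid (lens cols : List Int) : Prop :=
  List.Forall₂ (fun l c => 0 ≤ c ∧ c ≤ l) lens cols

theorem pvMod_self (l : Int) : PySem.Int.mod (l + 1) (l + 1) = 0 := by
  rw [PySem.Int.mod_eq_zero_iff_dvd]

theorem pvMod_small {c l : Int} (h0 : 0 ≤ c) (h1 : c < l) :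
    PySem.Int.mod (c + 1) (l + 1) = c + 1 := by
  rw [PySem.Int.mod_eq_emod_of_pos (by omega : (0:Int) < l + 1)]
  exact Int.emod_eq_of_lt (by omega) (by omega)

theorem pvStates_head {lens cols : List Int} (h : pvValid lens cols) :
    pvStates lens cols = cols :: (pvStates lens cols).drop 1 := by
  cases h with
  | nil => rfl
  | cons hlc htl =>
    simp [pvStates, List.range_succ_eq_map]

theorem pvStates_top (lens : List Int) : pvStates lens lens = [lens] := by
  induction lens with
  | nil => rfl
  | cons l ls ih => simp [pvStates, ih]

theorem pvValid_inc {lens cols : List Int} (h : pvValid lens cols) (hne : cols ≠ lens) :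
    pvValid lens (pvIncA cols lens) := by
  induction h with
  | nil => exact absurd rfl hne
  | @cons l c ls cs hlc htl ih =>
    by_cases hc : c = l
    · subst hc
      have hcs : cs ≠ ls := by rintro rfl; exact hne rfl
      simp only [pvIncA, pvMod_self _]
      exact List.Forall₂.cons ⟨le_refl 0, hlc.1⟩ (ih hcs)
    · have hlt : c < l := lt_of_le_of_ne hlc.2 hc
      simp only [pvIncA, pvMod_small hlc.1 hlt, if_neg (by omega : ¬ c + 1 = 0)]
      exact List.Forall₂.cons ⟨by omega, by omega⟩ htl

theorem pvStates_step {lens cols : List Int} (h : pvValid lens cols) (hne : cols ≠ lens) :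
    pvStates lens cols = cols :: pvStates lens (pvIncA cols lens) := by
  induction h with
  | nil => exact absurd rfl hne
  | @cons l c ls cs hlc htl ih =>
    by_cases hc : c = l
    · subst hc
      have hcs : cs ≠ ls := by rintro rfl; exact hne rfl
      have h1 := ih hcs
      have h2 := pvStates_head (pvValid_inc htl hcs)
      have hinc : pvIncA (c :: cs) (c :: ls) = 0 :: pvIncA cs ls := by
        simp [pvIncA, pvMod_self _]
      rw [hinc]
      have e1 : (c - c).toNat + 1 = 1 := by omega
      have e2 : (c - 0).toNat + 1 = (c + 1).toNat := by omega
      simp only [pvStates, e1, e2]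
      rw [h1, List.drop_succ_cons, List.drop_zero, h2, List.flatMap_cons]
      simp
    · have hlt : c < l := lt_of_le_of_ne hlc.2 hc
      have hinc : pvIncA (c :: cs) (l :: ls) = (c + 1) :: cs := by
        simp [pvIncA, pvMod_small hlc.1 hlt]; omega
      rw [hinc]
      simp only [pvStates]
      have hn : (l - c).toNat + 1 = ((l - (c + 1)).toNat + 1) + 1 := by omega
      rw [hn, List.range_succ_eq_map, List.map_cons, List.map_map, List.cons_append,
        List.cons.injEq]
      refine ⟨by simp, ?_⟩
      rw [List.append_cancel_right_eq]
      refine List.map_congr_left ?_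
      intro i _
      simp only [Function.comp, List.cons.injEq, and_true]
      push_cast
      omega

theorem pvSteps_step {lens cols : List Int} (h : pvValid lens cols) (hne : cols ≠ lens) :
    pvSteps lens cols = pvSteps lens (pvIncA cols lens) + 1 := by
  induction h with
  | nil => exact absurd rfl hne
  | @cons l c ls cs hlc htl ih =>
    by_cases hc : c = l
    · subst hc
      have hcs : cs ≠ ls := by rintro rfl; exact hne rfl
      have hinc : pvIncA (c :: cs) (c :: ls) = 0 :: pvIncA cs ls := by
        simp [pvIncA, pvMod_self _]
      rw [hinc]
      simp only [pvSteps]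
      rw [ih hcs, Nat.mul_add, Nat.mul_one]
      have h1 : (c - c).toNat = 0 := by omega
      have h2 : (c - 0).toNat + 1 = (c + 1).toNat := by omega
      omega
    · have hlt : c < l := lt_of_le_of_ne hlc.2 hc
      have hinc : pvIncA (c :: cs) (l :: ls) = (c + 1) :: cs := by
        simp [pvIncA, pvMod_small hlc.1 hlt]; omega
      rw [hinc]
      simp only [pvSteps]
      have : (l - c).toNat = (l - (c + 1)).toNat + 1 := by omega
      omega

theorem pvLoopA_run (row : Int) (begins : List Int) :
    ∀ (fuel : Nat) (lens cols : List Int), pvValid lens cols → pvSteps lens cols ≤ fuel →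
      pvLoopA row begins lens fuel cols =
        (pvStates lens cols).map (fun c => pvArrA row c begins) := by
  intro fuel
  induction fuel with
  | zero =>
    intro lens cols h hs
    by_cases hc : cols = lens
    · subst hc; simp [pvLoopA, pvStates_top]
    · exfalso; have := pvSteps_step h hc; omega
  | succ f ihf =>
    intro lens cols h hs
    by_cases hc : cols = lens
    · subst hc; simp [pvLoopA, pvStates_top]
    · simp only [pvLoopA, if_neg hc]
      rw [ihf lens _ (pvValid_inc h hc)
        (by have := pvSteps_step h hc; omega)]
      rw [pvStates_step h hc, List.map_cons]

theorem pvValid_zero (intervals : List (Int × Int))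
    (hpre : ∀ p ∈ intervals, p.1 - 1 ≤ p.2) :
    pvValid (intervals.map (fun p => p.2 - p.1 + 1)) (intervals.map (fun _ => (0 : Int))) := by
  induction intervals with
  | nil => exact List.Forall₂.nil
  | cons p rest ih =>
    obtain ⟨b, e⟩ := p
    simp only [List.map_cons]
    refine List.Forall₂.cons ⟨le_refl 0, ?_⟩
      (ih (fun q hq => hpre q (List.mem_cons_of_mem (b, e) hq)))
    have := hpre (b, e) List.mem_cons_self
    show (0 : Int) ≤ e - b + 1
    simp at this
    omega

theorem pvSteps_fuel (intervals : List (Int × Int))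
    (hpre : ∀ p ∈ intervals, p.1 - 1 ≤ p.2) :
    pvSteps (intervals.map (fun p => p.2 - p.1 + 1)) (intervals.map (fun _ => (0 : Int))) + 1 =
      ((intervals.map (fun p => p.2 - p.1 + 1)).map (fun l => (l + 1).toNat)).prod := by
  induction intervals with
  | nil => rfl
  | cons p rest ih =>
    obtain ⟨b, e⟩ := p
    have hp := hpre (b, e) List.mem_cons_self
    have ih' := ih (fun q hq => hpre q (List.mem_cons_of_mem (b, e) hq))
    simp only [List.map_cons, pvSteps, List.prod_cons]
    rw [← ih', Nat.mul_add, Nat.mul_one]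
    have h1 : (e - b + 1 - 0).toNat + 1 = (e - b + 1 + 1).toNat := by simp at hp; omega
    omega

theorem pvOptionsB_range (row b e : Int) (hb : b - 1 ≤ e) :
    pvOptionsB row b e = (List.range ((e - b + 2).toNat)).map
      (fun (i : Nat) => if 0 < (i : Int) then some (row, (i : Int) + b - 1) else none) := by
  unfold pvOptionsB
  rw [PySem.List.pyRange_one]
  have hn : (e - b + 2).toNat = (e + 1 - b).toNat + 1 := by omega
  rw [hn, List.range_succ_eq_map, List.map_cons, List.map_map, List.map_map]
  simp only [Nat.cast_zero, List.cons.injEq]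
  refine ⟨by norm_num, ?_⟩
  refine List.map_congr_left ?_
  intro i _
  simp only [Function.comp]
  have h0 : (0 : Int) < ((i + 1 : Nat) : Int) := by push_cast; omega
  rw [if_pos h0]
  push_cast
  congr 2
  omega

theorem pvCombos_states (row : Int) (intervals : List (Int × Int))
    (hpre : ∀ p ∈ intervals, p.1 - 1 ≤ p.2) :
    pvCombosB row intervals =
      (pvStates (intervals.map (fun p => p.2 - p.1 + 1)) (intervals.map (fun _ => (0 : Int)))).map
        (pvToCombo row intervals) := by
  induction intervals with
  | nil => rfl
  | cons p rest ih =>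
    obtain ⟨b, e⟩ := p
    have hb : b - 1 ≤ e := hpre (b, e) List.mem_cons_self
    have hpre' : ∀ q ∈ rest, q.1 - 1 ≤ q.2 := fun q hq => hpre q (List.mem_cons_of_mem _ hq)
    have ih' := ih hpre'
    have hhead := pvStates_head (pvValid_zero rest hpre')
    -- S3: the zero-start state list is a flatMap over the tail state list
    have hS3 : pvStates ((e - b + 1) :: rest.map (fun p => p.2 - p.1 + 1))
        ((0 : Int) :: rest.map (fun _ => (0 : Int))) =
        (pvStates (rest.map (fun p => p.2 - p.1 + 1)) (rest.map (fun _ => (0 : Int)))).flatMap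
          (fun t => (List.range ((e - b + 2).toNat)).map (fun (i : Nat) => ((i : Int)) :: t)) := by
      conv_rhs => rw [hhead]
      rw [List.flatMap_cons]
      simp only [pvStates]
      have h1 : (e - b + 1 - 0).toNat + 1 = (e - b + 1 + 1).toNat := by omega
      have h2 : (e - b + 1 + 1).toNat = (e - b + 2).toNat := by omega
      rw [h1, h2]
      simp
    simp only [List.map_cons, pvCombosB]
    rw [hS3, ih', List.flatMap_map, List.map_flatMap]
    refine List.flatMap_congr ?_
    intro t _
    rw [pvOptionsB_range row b e hb, List.map_map, List.map_map]
    refine List.map_congr_left ?_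
    intro i _
    simp only [Function.comp, pvToCombo]

theorem pvRawA_toCombo (row : Int) :
    ∀ (intervals : List (Int × Int)) (cols : List Int),
      pvRawA row cols (intervals.map (fun p => p.1)) =
        (pvToCombo row intervals cols).filterMap id := by
  intro intervals
  induction intervals with
  | nil => intro cols; cases cols <;> rfl
  | cons p rest ih =>
    intro cols
    obtain ⟨b, e⟩ := p
    cases cols with
    | nil => rfl
    | cons i t =>
      simp only [List.map_cons, pvRawA, List.zip_cons_cons, pvToCombo]
      by_cases hi : 0 < i
      · rw [List.filter_cons_of_pos (by simpa using hi), if_pos hi]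
        simp only [List.map_cons, List.filterMap_cons, id]
        exact congrArg _ (ih t)
      · rw [List.filter_cons_of_neg (by simpa using hi), if_neg hi]
        simp only [List.filterMap_cons, id]
        exact ih t

-- ===== VERDICT (by name: the statement is the Claim_ definition above) =====
theorem get_line_queens_arrangements_spec : Claim_equal_get_line_queens_arrangements := by
  intro row intervals _ hpre
  unfold Spec_get_line_queens_arrangements
  unfold get_line_queens_arrangements get_line_queens_arrangements_alt
  rw [pvLoopA_run row _ _ _ _ (pvValid_zero intervals hpre)
      (by rw [← pvSteps_fuel intervals hpre]; omega)]
  rw [pvCombos_states row intervals hpre, List.map_map]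
  refine List.map_congr_left ?_
  intro c _
  simp only [Function.comp, pvArrA, pvRawA_toCombo row intervals c]
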